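-- pv_equiv track=rewrite | github.com/ipwh/AI-Quiz-Generator | core/validators.py | normalize_single_correct
-- ===== SOURCE A (Python) =====
-- from typing import List, Dict, Tuple
--
-- VALID_CORRECT = {"1", "2", "3", "4"}
--
-- def normalize_single_correct(correct: List[str]) -> List[str]:
--     if correct is None:
--         return ["1"]
--     if isinstance(correct, str):
--         correct = [correct]
--     if not isinstance(correct, list):
--         return ["1"]
--     cleaned = [str(x).strip() for x in correct if str(x).strip()]
--     cleaned = [c for c in cleaned if c in VALID_CORRECT]
--     return [cleaned[0]] if cleaned else ["1"]
-- ===== SOURCE B (Python) =====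
-- from typing import List
--
-- VALID_CORRECT = {"1", "2", "3", "4"}
--
-- def normalize_single_correct(correct: List[str]) -> List[str]:
--     if correct is None:
--         return ["1"]
--     if isinstance(correct, str):
--         correct = [correct]
--     if not isinstance(correct, list):
--         return ["1"]
--     # Walk the list back-to-front, overwriting the default with every valid
--     # stripped entry; the first valid element is seen last, so it wins.
--     result = "1"
--     for x in reversed(correct):
--         s = str(x).strip()
--         if s in VALID_CORRECT:
--             result = s
--     return [result]
-- ===== Notes on version B (the rewrite author's own statement) =====
-- stated objective: alternative
-- what changed: Replaced the two filtering comprehensions plus head-indexing with a reversed single-pass overwrite fold: scan back-to-front, overwriting a default accumulator '1' with every valid stripped entry, so the first valid element wins by being seen last.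
import Mathlib
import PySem

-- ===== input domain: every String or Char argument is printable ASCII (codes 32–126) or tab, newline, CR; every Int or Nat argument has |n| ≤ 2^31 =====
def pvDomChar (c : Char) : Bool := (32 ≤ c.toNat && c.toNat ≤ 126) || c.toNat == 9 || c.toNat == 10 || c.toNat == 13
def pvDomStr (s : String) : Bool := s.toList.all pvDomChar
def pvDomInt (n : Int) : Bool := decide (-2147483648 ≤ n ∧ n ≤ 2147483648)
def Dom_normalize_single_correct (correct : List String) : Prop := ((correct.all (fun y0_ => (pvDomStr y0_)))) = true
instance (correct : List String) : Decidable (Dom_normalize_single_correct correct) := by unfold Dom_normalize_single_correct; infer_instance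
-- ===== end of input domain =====

-- B replaces the filter-filter-head pipeline with a reversed overwrite fold (objective: alternative).
-- ===== PORT A =====
def normalize_single_correct (correct : List String) : List String :=
  -- cleaned = [str(x).strip() for x in correct if str(x).strip()]
  let cleaned := (correct.map (fun x => PySem.Str.strip x)).filter (fun s => s ≠ "")
  -- cleaned = [c for c in cleaned if c in VALID_CORRECT]
  let cleaned2 := cleaned.filter (fun c => c == "1" || c == "2" || c == "3" || c == "4")
  -- return [cleaned[0]] if cleaned else ["1"]
  match cleaned2 with
  | [] => ["1"]
  | c :: _ => [c]

-- ===== PORT B =====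
def normalize_single_correct_alt (correct : List String) : List String :=
  -- result = "1"; for x in reversed(correct): s = str(x).strip(); if s in VALID_CORRECT: result = s
  let result := correct.reverse.foldl
    (fun acc x =>
      let s := PySem.Str.strip x
      if s == "1" || s == "2" || s == "3" || s == "4" then s else acc) "1"
  [result]

-- ===== PRECONDITION & SPEC =====
def Spec_normalize_single_correct (correct : List String) (out : List String) : Prop := out = normalize_single_correct_alt correct
instance (correct : List String) (out : List String) : Decidable (Spec_normalize_single_correct correct out) := by unfold Spec_normalize_single_correct; infer_instance

-- ===== CLAIM (what is proved, stated in full; the proofs are below) =====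
def Claim_equal_normalize_single_correct : Prop := ∀ (correct : List String), Dom_normalize_single_correct correct → Spec_normalize_single_correct correct (normalize_single_correct correct)

-- ===== LEMMAS AND PROOFS =====
lemma eq_all (correct : List String) :
    normalize_single_correct correct = normalize_single_correct_alt correct := by
  induction correct with
  | nil => rfl
  | cons x rest ih =>
    simp only [normalize_single_correct, normalize_single_correct_alt,
      List.foldl_reverse, List.foldr_cons, List.map_cons, List.filter_cons] at *
    by_cases h2 : (PySem.Str.strip x == "1" || PySem.Str.strip x == "2" ||
        PySem.Str.strip x == "3" || PySem.Str.strip x == "4") = true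
    · have h1 : PySem.Str.strip x ≠ "" := by
        rcases Bool.or_eq_true_iff.mp h2 with h | h
        · rcases Bool.or_eq_true_iff.mp h with h | h
          · rcases Bool.or_eq_true_iff.mp h with h | h <;>
              simp_all
          · simp_all
        · simp_all
      simp [h1, h2]
    · by_cases h1 : PySem.Str.strip x ≠ ""
      · simp only [decide_eq_true_eq, if_pos h1, List.filter_cons, h2, if_false,
          Bool.false_eq_true] at *
        simpa using ih
      · simp only [ne_eq, not_not] at h1
        simp only [h1] at *
        simpa [h2] using ih

-- ===== VERDICT (by name: the statement is the Claim_ definition above) =====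
theorem normalize_single_correct_spec : Claim_equal_normalize_single_correct := by
  intro correct _
  unfold Spec_normalize_single_correct
  exact eq_all correct
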